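-- pv_equiv track=rewrite | github.com/Senya-hub/for-myself | python/courses/module14.py | coup_first
-- ===== SOURCE A (Python) =====
-- def coup_first(num):
--     part = ''
--     partNum = ' '
--     for i in num:
--          if i == '.':
--             partNum += part
--             partNum += i
--             part = ''
--          else:
--             part = i + part
--     partNum += part
--     return partNum
-- ===== SOURCE B (Python) =====
-- def coup_first(num):
--     return ' ' + '.'.join(seg[::-1] for seg in num.split('.'))
-- ===== Notes on version B (the rewrite author's own statement) =====
-- stated objective: faster
-- what changed: Replaces the char-by-char loop that prepends each character to a growing segment string with a split-on-dot / reverse-each-segment / join pipeline (the leading space of A's initializer is reproduced with a literal prefix).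
import Mathlib
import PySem

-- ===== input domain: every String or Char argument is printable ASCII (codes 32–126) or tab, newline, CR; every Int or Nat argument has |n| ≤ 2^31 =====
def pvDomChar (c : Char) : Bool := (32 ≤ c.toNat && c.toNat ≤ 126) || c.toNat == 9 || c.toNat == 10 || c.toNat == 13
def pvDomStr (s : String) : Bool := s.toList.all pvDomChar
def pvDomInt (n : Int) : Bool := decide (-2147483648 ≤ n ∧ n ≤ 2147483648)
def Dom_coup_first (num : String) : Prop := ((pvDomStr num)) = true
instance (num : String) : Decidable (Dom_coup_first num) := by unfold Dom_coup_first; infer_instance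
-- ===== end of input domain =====

-- B replaces A's char-by-char prepend loop with a split-on-dot / reverse-segments / join pipeline (idiomatic).

-- ===== PORT A =====
-- state: (part, partNum) as char lists; 'part = i + part' prepends, appends are list appends
def coup_first (num : String) : String :=
  let st := num.toList.foldl
    (fun (s : List Char × List Char) i =>
      if i = '.' then ([], s.2 ++ s.1 ++ [i]) else (i :: s.1, s.2))
    ([], [' '])
  String.ofList (st.2 ++ st.1)

-- ===== PORT B =====
-- ' ' + '.'.join(seg[::-1] for seg in num.split('.'))
def coup_first_alt (num : String) : String :=
  String.ofList (' ' :: PySem.Chars.join ['.']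
    ((PySem.Chars.splitOn num.toList ['.']).map List.reverse))

-- ===== PRECONDITION & SPEC =====
def Spec_coup_first (num : String) (out : String) : Prop := out = coup_first_alt num
instance (num : String) (out : String) : Decidable (Spec_coup_first num out) := by unfold Spec_coup_first; infer_instance

-- ===== CLAIM (what is proved, stated in full; the proofs are below) =====
def Claim_equal_coup_first : Prop := ∀ (num : String), Dom_coup_first num → Spec_coup_first num (coup_first num)

-- ===== LEMMAS AND PROOFS =====

-- split on a single '.' as plain structural recursion (cur is the reversed current segment)
def splitAux : List Char → List Char → List (List Char)
  | [], cur => [cur.reverse]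
  | c :: rest, cur => if c = '.' then cur.reverse :: splitAux rest [] else splitAux rest (c :: cur)

theorem splitAux_ne_nil (l cur : List Char) : splitAux l cur ≠ [] := by
  cases l with
  | nil => simp [splitAux]
  | cons c rest =>
    simp only [splitAux]
    split <;> simp_all [splitAux_ne_nil rest]

theorem go_single (fuel : Nat) : ∀ (l cur : List Char) (acc : List (List Char)),
    l.length ≤ fuel →
    PySem.Chars.splitOn.go ['.'] fuel l cur acc = acc.reverse ++ splitAux l cur := by
  induction fuel with
  | zero =>
    intro l cur acc h
    have : l = [] := by cases l <;> simp_all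
    subst this
    simp [PySem.Chars.splitOn.go, splitAux]
  | succ n ih =>
    intro l cur acc h
    cases l with
    | nil => simp [PySem.Chars.splitOn.go, splitAux]
    | cons c rest =>
      have hrest : rest.length ≤ n := by simpa using Nat.le_of_succ_le_succ h
      have hp : List.isPrefixOf ['.'] (c :: rest) = ('.' == c) := by
        simp [List.isPrefixOf]
      by_cases hc : c = '.'
      · subst hc
        simp only [PySem.Chars.splitOn.go, hp, beq_self_eq_true, if_true, List.length_cons,
          List.length_nil, List.drop_succ_cons, List.drop_zero]
        rw [ih rest [] _ hrest]
        simp [splitAux]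
      · have hb : ('.' == c) = false := by
          simp only [beq_eq_false_iff_ne, ne_eq]
          exact fun h' => hc h'.symm
        simp only [PySem.Chars.splitOn.go, hp, hb, Bool.false_eq_true, if_false]
        rw [ih rest (c :: cur) acc hrest]
        simp [splitAux, hc]

theorem splitOn_dot (cs : List Char) :
    PySem.Chars.splitOn cs ['.'] = splitAux cs [] := by
  unfold PySem.Chars.splitOn
  rw [go_single (cs.length + 1) cs [] [] (by omega)]
  simp

theorem loop_eq (l : List Char) : ∀ (part acc : List Char),
    (l.foldl
        (fun (s : List Char × List Char) i =>
          if i = '.' then ([], s.2 ++ s.1 ++ [i]) else (i :: s.1, s.2))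
        (part, acc)).2
    ++ (l.foldl
        (fun (s : List Char × List Char) i =>
          if i = '.' then ([], s.2 ++ s.1 ++ [i]) else (i :: s.1, s.2))
        (part, acc)).1
    = acc ++ PySem.Chars.join ['.'] ((splitAux l part).map List.reverse) := by
  induction l with
  | nil =>
    intro part acc
    simp [splitAux, PySem.Chars.join, List.intercalate]
  | cons c rest ih =>
    intro part acc
    by_cases hc : c = '.'
    · subst hc
      simp only [List.foldl_cons]
      rw [if_pos trivial, ih [] (acc ++ part ++ ['.'])]
      obtain ⟨y, ys, hy⟩ : ∃ y ys, splitAux rest [] = y :: ys := by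
        cases h : splitAux rest [] with
        | nil => exact absurd h (splitAux_ne_nil rest [])
        | cons y ys => exact ⟨y, ys, rfl⟩
      have hs : splitAux ('.' :: rest) part = part.reverse :: splitAux rest [] := by
        simp [splitAux]
      rw [hs, hy]
      simp only [List.map_cons, List.reverse_reverse]
      rw [PySem.Chars.join_cons_cons]
      simp
    · simp only [List.foldl_cons]
      rw [if_neg hc, ih (c :: part) acc]
      simp [splitAux, hc]

-- ===== VERDICT (by name: the statement is the Claim_ definition above) =====
theorem coup_first_spec : Claim_equal_coup_first := by
  intro num _
  unfold Spec_coup_first coup_first coup_first_alt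
  rw [splitOn_dot]
  show String.ofList ((num.toList.foldl
      (fun (s : List Char × List Char) i =>
        if i = '.' then ([], s.2 ++ s.1 ++ [i]) else (i :: s.1, s.2)) ([], [' '])).2
    ++ (num.toList.foldl
      (fun (s : List Char × List Char) i =>
        if i = '.' then ([], s.2 ++ s.1 ++ [i]) else (i :: s.1, s.2)) ([], [' '])).1) = _
  rw [loop_eq num.toList [] [' ']]
  simp
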